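-- pv_equiv track=rewrite | github.com/imidg1825/ai-concierge | app/price_search.py | clean_prices
-- ===== SOURCE A (Python) =====
-- def clean_prices(prices: list[int]) -> list[int]:
--     return sorted(
--         {
--             price
--             for price in prices
--             if isinstance(price, int) and 1000 < price < 1_000_000
--         }
--     )
-- ===== SOURCE B (Python) =====
-- def clean_prices(prices: list[int]) -> list[int]:
--     # Incremental ordered insertion: maintain a sorted, duplicate-free result
--     # directly; no sort call and no set.
--     result = []
--     for price in prices:
--         if isinstance(price, int) and 1000 < price < 1_000_000:
--             i = 0
--             while i < len(result) and result[i] < price: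
--                 i += 1
--             if i == len(result) or result[i] != price:
--                 result.insert(i, price)
--     return result
-- ===== Notes on version B (the rewrite author's own statement) =====
-- stated objective: alternative
-- what changed: Replaces filter-into-set then sorted() with incremental ordered insertion: each valid price is inserted at its position in an always-sorted duplicate-free result list (skipped if already present), so no set and no sort call exist.
import Mathlib
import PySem

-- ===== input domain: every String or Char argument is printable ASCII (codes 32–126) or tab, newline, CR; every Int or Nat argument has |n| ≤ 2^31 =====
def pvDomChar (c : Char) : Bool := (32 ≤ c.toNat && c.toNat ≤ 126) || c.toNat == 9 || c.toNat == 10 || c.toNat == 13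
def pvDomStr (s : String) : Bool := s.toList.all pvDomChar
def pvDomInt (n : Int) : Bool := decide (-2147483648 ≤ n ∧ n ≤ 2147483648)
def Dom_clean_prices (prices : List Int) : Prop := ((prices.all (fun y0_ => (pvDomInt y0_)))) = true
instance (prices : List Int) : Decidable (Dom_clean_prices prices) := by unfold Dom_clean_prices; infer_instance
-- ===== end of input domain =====

-- B replaces filter-into-set-then-sort by incremental ordered insertion into an always-sorted
-- duplicate-free result (no set, no sort call); alternative decomposition, no speed claim.

-- ===== PORT A =====
-- sorted({price for price in prices if isinstance(price, int) and 1000 < price < 1_000_000})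
def clean_prices (prices : List Int) : List Int :=
  PySem.List.sorted
    (PySem.Set.ofList (prices.filter (fun price => decide (1000 < price) && decide (price < 1000000))))
    (fun x => x) false

-- ===== PORT B =====
-- the inner 'while i < len(result) and result[i] < price' scan plus
-- 'if i == len(result) or result[i] != price: result.insert(i, price)',
-- written as the structural recursion over the scanned prefix (exact: same scan, same insertion point)
def pvInsU (p : Int) : List Int → List Int
  | [] => [p]
  | x :: t => if x < p then x :: pvInsU p t else if x = p then x :: t else p :: x :: t

-- result = []; for price in prices: if isinstance(price, int) and 1000 < price < 1_000_000: <ordered insert>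
def clean_prices_alt (prices : List Int) : List Int :=
  prices.foldl
    (fun result price =>
      if decide (1000 < price) && decide (price < 1000000) then pvInsU price result else result)
    []

-- ===== PRECONDITION & SPEC =====
def Spec_clean_prices (prices : List Int) (out : List Int) : Prop := out = clean_prices_alt prices
instance (prices : List Int) (out : List Int) : Decidable (Spec_clean_prices prices out) := by unfold Spec_clean_prices; infer_instance

-- ===== CLAIM =====
def Claim_equal_clean_prices : Prop := ∀ (prices : List Int), Dom_clean_prices prices → Spec_clean_prices prices (clean_prices prices)

-- ===== LEMMAS AND PROOFS =====

lemma pv_mem_insU (p x : Int) (l : List Int) : x ∈ pvInsU p l ↔ x = p ∨ x ∈ l := by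
  induction l with
  | nil => simp [pvInsU]
  | cons a t ih =>
    by_cases h1 : a < p
    · simp only [pvInsU, if_pos h1, List.mem_cons, ih]; tauto
    · by_cases h2 : a = p
      · subst h2
        simp only [pvInsU, if_neg h1, if_true, List.mem_cons]
        tauto
      · simp only [pvInsU, if_neg h1, if_neg h2, List.mem_cons]

lemma pv_insU_sorted (p : Int) (l : List Int) (h : l.Pairwise (· < ·)) :
    (pvInsU p l).Pairwise (· < ·) := by
  induction l with
  | nil => simp [pvInsU]
  | cons a t ih =>
    have h' := List.pairwise_cons.mp h
    by_cases h1 : a < p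
    · simp only [pvInsU, if_pos h1]
      refine List.pairwise_cons.mpr ⟨?_, ih h'.2⟩
      intro b hb
      rcases (pv_mem_insU p b t).mp hb with rfl | hb
      · exact h1
      · exact h'.1 b hb
    · by_cases h2 : a = p
      · simpa [pvInsU, if_neg h1, if_pos h2] using h
      · have hpa : p < a := lt_of_le_of_ne (not_lt.mp h1) (fun e => h2 e.symm)
        simp only [pvInsU, if_neg h1, if_neg h2]
        refine List.pairwise_cons.mpr ⟨?_, h⟩
        intro b hb
        rcases List.mem_cons.mp hb with rfl | hb
        · exact hpa
        · exact lt_trans hpa (h'.1 b hb)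

lemma pv_fold_guard (f : Int → Bool) : ∀ (l : List Int) (acc : List Int),
    l.foldl (fun result price => if f price then pvInsU price result else result) acc
      = (l.filter f).foldl (fun result price => pvInsU price result) acc := by
  intro l
  induction l with
  | nil => intro acc; simp
  | cons a t ih =>
    intro acc
    by_cases h : f a <;> simp [h, ih]

lemma pv_fold_inv : ∀ (l acc : List Int), acc.Pairwise (· < ·) →
    (l.foldl (fun result price => pvInsU price result) acc).Pairwise (· < ·) ∧
    (∀ x, x ∈ l.foldl (fun result price => pvInsU price result) acc ↔ x ∈ acc ∨ x ∈ l) := by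
  intro l
  induction l with
  | nil => intro acc h; exact ⟨h, by simp⟩
  | cons a t ih =>
    intro acc h
    simp only [List.foldl_cons]
    have h' := ih (pvInsU a acc) (pv_insU_sorted a acc h)
    refine ⟨h'.1, fun x => ?_⟩
    rw [h'.2 x, pv_mem_insU]
    simp only [List.mem_cons]; tauto

-- ===== VERDICT =====
theorem clean_prices_spec : Claim_equal_clean_prices := by
  intro prices _
  unfold Spec_clean_prices clean_prices clean_prices_alt
  set f : Int → Bool := fun price => decide (1000 < price) && decide (price < 1000000) with hf
  rw [pv_fold_guard f prices []]
  set fl := prices.filter f with hfl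
  have hinv := pv_fold_inv fl [] List.Pairwise.nil
  set B := fl.foldl (fun result price => pvInsU price result) [] with hB
  have hBlt : B.Pairwise (· < ·) := hinv.1
  have hBmem : ∀ x, x ∈ B ↔ x ∈ fl := by
    intro x; rw [hinv.2 x]; simp
  have hBnodup : B.Nodup := hBlt.imp (fun h => ne_of_lt h)
  have hperm : B.Perm (PySem.Set.ofList fl) := by
    rw [List.perm_iff_count]
    intro a
    rw [List.Nodup.count hBnodup, List.Nodup.count (PySem.Set.nodup_ofList fl)]
    by_cases ha : a ∈ fl
    · simp [PySem.Set.mem_ofList, ha, (hBmem a).mpr ha]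
    · have : a ∉ B := fun h => ha ((hBmem a).mp h)
      simp [PySem.Set.mem_ofList, ha, this]
  exact PySem.List.sorted_eq_of_perm_of_pairwise_lt (PySem.Set.ofList fl) B (fun x => x) hperm hBlt
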